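-- pv_equiv track=rewrite | github.com/wonkim0512/BDM | HW2/common_divisor.py | prime_combinations
-- ===== SOURCE A (Python) =====
-- primeslist = [
--       2,     3,     5,     7,    11,    13,    17,    19,    23,    29,
--      31,    37,    41,    43,    47,    53,    59,    61,    67,    71,
--      73,    79,    83,    89,    97,   101,   103,   107,   109,   113,
-- ]
--
-- def prime_combinations(n):
--     """Generate combinations of distinct primes where their product is
--     less than n. Each yielded item is a 3-tuple containing:
--     - the combination in increasing order,
--     - the product of the primes in the combination,
--     - k where the last and largest prime in the combination is the k'th
--       prime (where 2 is the 1st prime.)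
--     Items are yielded in lexicographical order. The first item yielded
--     is the empty combination ((), 1, 0).
--     """
--     def primecombos(prefix, prod, ndx):
--         yield prefix, prod, ndx
--         while True:
--             newprime = primeslist[ndx]
--             newprod = prod * newprime
--             if newprod >= n:
--                 return
--             yield from primecombos(prefix + (newprime,), newprod, ndx+1)
--             ndx += 1
--
--     if 1 < n <= primeslist[-1] and n == int(n):
--         yield from primecombos((), 1, 0)
-- ===== SOURCE B (Python) =====
-- primeslist = [
--       2,     3,     5,     7,    11,    13,    17,    19,    23,    29,
--      31,    37,    41,    43,    47,    53,    59,    61,    67,    71,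
--      73,    79,    83,    89,    97,   101,   103,   107,   109,   113,
-- ]
--
-- def prime_combinations(n):
--     """Iterative pre-order DFS over an explicit stack instead of
--     recursive generators."""
--     if not (1 < n <= primeslist[-1] and n == int(n)):
--         return
--     stack = [((), 1, 0)]
--     while stack:
--         prefix, prod, ndx = stack.pop()
--         yield prefix, prod, ndx
--         children = []
--         j = ndx
--         while j < len(primeslist) and prod * primeslist[j] < n:
--             children.append((prefix + (primeslist[j],), prod * primeslist[j], j + 1))
--             j += 1
--         stack.extend(reversed(children))
-- ===== Notes on version B (the rewrite author's own statement) =====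
-- stated objective: alternative
-- what changed: A's recursive generator (primecombos with yield-from) is replaced by an iterative pre-order DFS over an explicit stack of (prefix, prod, ndx) states, popping a state, yielding it, and pushing its children reversed.
import Mathlib
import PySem

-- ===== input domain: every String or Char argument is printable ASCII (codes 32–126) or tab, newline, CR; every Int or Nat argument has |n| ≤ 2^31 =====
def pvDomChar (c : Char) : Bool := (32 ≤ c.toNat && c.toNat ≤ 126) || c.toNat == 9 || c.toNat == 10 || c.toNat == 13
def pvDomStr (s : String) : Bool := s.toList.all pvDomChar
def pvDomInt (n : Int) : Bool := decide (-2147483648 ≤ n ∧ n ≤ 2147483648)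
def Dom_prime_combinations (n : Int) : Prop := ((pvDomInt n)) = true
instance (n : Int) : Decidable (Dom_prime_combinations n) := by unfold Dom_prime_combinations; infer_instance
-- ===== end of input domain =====

-- B replaces A's recursive generator by an iterative pre-order DFS over an explicit stack
-- of (pref, prod, ndx) states (objective: alternative decomposition, same cost).

def primeslist : List Int := [
      2,     3,     5,     7,    11,    13,    17,    19,    23,    29,
     31,    37,    41,    43,    47,    53,    59,    61,    67,    71,
     73,    79,    83,    89,    97,   101,   103,   107,   109,   113]

-- ===== PORT A =====
-- A's inner `while True` loop over ndx, with the recursive `yield from` inlined as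
-- list append; the loop walks the suffix `rest` of primeslist (ndx only under the guard
-- 1 < n ≤ 113 the indexing stays in range, so the suffix view is exact).
def loopA (n : Int) (rest : List Int) (pref : List Int) (prod ndx : Int) :
    List (List Int × Int × Int) :=
  match rest with
  | [] => []
  | p :: ps =>
    if prod * p < n then
      ((pref ++ [p], prod * p, ndx + 1) :: loopA n ps (pref ++ [p]) (prod * p) (ndx + 1))
        ++ loopA n ps pref prod (ndx + 1)
    else []

def prime_combinations (n : Int) : List (List Int × Int × Int) :=
  if 1 < n ∧ n ≤ 113 then ([], 1, 0) :: loopA n primeslist [] 1 0 else []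

-- ===== PORT B =====
-- `children`: B's inner while loop collecting (pref+(p_j,), prod*p_j, j+1) for j = ndx,…
-- while j < len(primeslist) and prod*primeslist[j] < n.  ndx is a list index, always a
-- nonnegative machine int in B, carried as Nat internally and cast to Int when yielded.
def childrenB (n prod : Int) (pref : List Int) (j : Nat) :
    List (List Int × Int × Nat) :=
  if h : j < primeslist.length then
    if prod * primeslist[j] < n then
      (pref ++ [primeslist[j]], prod * primeslist[j], j + 1) :: childrenB n prod pref (j + 1)
    else []
  else []
termination_by primeslist.length - j

def pvWt (s : List Int × Int × Nat) : Nat := 2 ^ (31 - s.2.2)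

theorem childrenB_wt (n prod : Int) (pref : List Int) (j : Nat) :
    ((childrenB n prod pref j).map pvWt).sum < 2 ^ (31 - j) := by
  fun_induction childrenB n prod pref j with
  | case1 j h hlt ih =>
    simp only [List.map_cons, List.sum_cons, pvWt]
    have hj : j < 30 := by simpa [primeslist] using h
    have he : 31 - j = (31 - (j + 1)) + 1 := by omega
    rw [he, pow_succ]
    have h1 : 1 ≤ 2 ^ (31 - (j + 1)) := Nat.one_le_two_pow
    omega
  | case2 j h hlt => simp
  | case3 j h => simp

-- B's `while stack:` loop; the stack top is the list head, so Python's
-- `stack.extend(reversed(children)); stack.pop()` is exactly prepending `children`.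
-- (childrenB_wt above is cited by the termination proof of this loop.)
def stackB (n : Int) (stack : List (List Int × Int × Nat)) :
    List (List Int × Int × Int) :=
  match stack with
  | [] => []
  | (pref, prod, ndx) :: rest =>
    (pref, prod, (ndx : Int)) :: stackB n (childrenB n prod pref ndx ++ rest)
termination_by (stack.map pvWt).sum
decreasing_by
  simp only [List.map_append, List.sum_append, List.map_cons, List.sum_cons]
  have := childrenB_wt n prod pref ndx
  simp only [pvWt] at *
  omega

def prime_combinations_alt (n : Int) : List (List Int × Int × Int) :=
  if 1 < n ∧ n ≤ 113 then stackB n [([], 1, 0)] else []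

-- ===== PRECONDITION & SPEC =====
def Spec_prime_combinations (n : Int) (out : List (List Int × Int × Int)) : Prop := out = prime_combinations_alt n
instance (n : Int) (out : List (List Int × Int × Int)) : Decidable (Spec_prime_combinations n out) := by unfold Spec_prime_combinations; infer_instance

-- ===== CLAIM (what is proved, stated in full; the proofs are below) =====
def Claim_equal_prime_combinations : Prop := ∀ (n : Int), Dom_prime_combinations n → Spec_prime_combinations n (prime_combinations n)

-- ===== LEMMAS AND PROOFS =====
-- the full A-output of one state
def emit (n : Int) (s : List Int × Int × Nat) : List (List Int × Int × Int) :=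
  (s.1, s.2.1, (s.2.2 : Int)) :: loopA n (primeslist.drop s.2.2) s.1 s.2.1 (s.2.2 : Int)

theorem loopA_eq_children (n prod : Int) (pref : List Int) (j : Nat) :
    loopA n (primeslist.drop j) pref prod (j : Int)
      = (childrenB n prod pref j).flatMap (emit n) := by
  fun_induction childrenB n prod pref j with
  | case1 j h hlt ih =>
    rw [List.drop_eq_getElem_cons h, loopA, if_pos hlt, List.flatMap_cons, ← ih, emit]
    push_cast
    simp
  | case2 j h hlt =>
    rw [List.drop_eq_getElem_cons h, loopA, if_neg hlt, List.flatMap_nil]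
  | case3 j h =>
    rw [List.drop_eq_nil_of_le (by omega), loopA, List.flatMap_nil]

theorem stackB_eq_flatMap (n : Int) (stack : List (List Int × Int × Nat)) :
    stackB n stack = stack.flatMap (emit n) := by
  fun_induction stackB n stack with
  | case1 => simp
  | case2 pref prod ndx rest ih =>
    rw [List.flatMap_cons, emit]
    rw [ih, List.flatMap_append, ← loopA_eq_children n prod pref ndx]
    simp

-- ===== VERDICT (by name: the statement is the Claim_ definition above) =====
theorem prime_combinations_spec : Claim_equal_prime_combinations := by
  intro n _
  unfold Spec_prime_combinations prime_combinations prime_combinations_alt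
  split
  · rw [stackB_eq_flatMap]
    simp only [List.flatMap_cons, List.flatMap_nil, List.append_nil, emit]
    simp
  · rfl
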